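-- pv_equiv track=rewrite | github.com/DenisListapad94/py_70_base | function.py | find_count_min
-- ===== SOURCE A (Python) =====
-- def find_count_min(arr):
--     min_count = arr[0].count('a')
--     min_count_index = 0
--     for item in range(1, len(arr)):
--         if arr[item].count('a') < min_count:
--             min_count = arr[item].count('a')
--             min_count_index = item
--     return min_count_index
-- ===== SOURCE B (Python) =====
-- def find_count_min(arr):
--     counts = [s.count('a') for s in arr]
--     return counts.index(min(counts))
-- ===== Notes on version B (the rewrite author's own statement) =====
-- stated objective: simpler
-- what changed: Replaces the indexed running-minimum loop with branch updates by building the full list of 'a'-counts and returning counts.index(min(counts)); first-minimum tie-breaking is preserved by min/index semantics.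
import Mathlib
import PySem

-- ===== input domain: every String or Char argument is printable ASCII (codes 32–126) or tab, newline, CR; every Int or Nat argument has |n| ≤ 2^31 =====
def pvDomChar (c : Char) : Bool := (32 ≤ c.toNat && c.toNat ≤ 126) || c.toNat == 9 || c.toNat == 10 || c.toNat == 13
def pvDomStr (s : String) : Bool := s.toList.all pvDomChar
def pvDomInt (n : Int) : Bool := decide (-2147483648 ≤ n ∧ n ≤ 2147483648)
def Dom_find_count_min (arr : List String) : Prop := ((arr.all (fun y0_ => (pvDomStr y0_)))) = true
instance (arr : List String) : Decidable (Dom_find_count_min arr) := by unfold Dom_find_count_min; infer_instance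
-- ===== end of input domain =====

-- B replaces A's indexed running-minimum loop by building the table of 'a'-counts and
-- taking the index of its minimum (same values, first-minimum tie-breaking); objective: simpler.

-- ===== PORT A =====
def find_count_min (arr : List String) : Int :=
  ((PySem.List.pyRange 1 (arr.length : Int) 1).foldl
    (fun (st : Nat × Int) item =>
      if PySem.Str.count (PySem.List.pyGetD arr item "") "a" < st.1 then
        (PySem.Str.count (PySem.List.pyGetD arr item "") "a", item)
      else st)
    (PySem.Str.count (arr.headD "") "a", 0)).2

-- ===== PORT B =====
def find_count_min_alt (arr : List String) : Int :=
  let counts := arr.map (fun s => PySem.Str.count s "a")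
  ((PySem.List.index? counts ((PySem.List.min? counts (fun x => x)).getD 0)).getD 0 : Int)

-- ===== PRECONDITION & SPEC =====
-- Pre_: A indexes arr[0], so the empty list raises IndexError in Python A (ValueError in B).
def Pre_find_count_min (arr : List String) : Prop := arr ≠ []
instance (arr : List String) : Decidable (Pre_find_count_min arr) := by
  unfold Pre_find_count_min; infer_instance
def pvWitness_find_count_min : List String := ["ba", "a"]

def Spec_find_count_min (arr : List String) (out : Int) : Prop := out = find_count_min_alt arr
instance (arr : List String) (out : Int) : Decidable (Spec_find_count_min arr out) := by unfold Spec_find_count_min; infer_instance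

-- ===== CLAIM (what is proved, stated in full; the proofs are below) =====
def Claim_equal_find_count_min : Prop := ∀ (arr : List String), Dom_find_count_min arr → Pre_find_count_min arr → Spec_find_count_min arr (find_count_min arr)

-- ===== LEMMAS AND PROOFS =====

-- A's loop, abstracted to the list of counts it visits (index carried as Int).
def loopN : List Nat → Int → Nat × Int → Nat × Int
  | [], _, st => st
  | c :: rest, i, st => loopN rest (i + 1) (if c < st.1 then (c, i) else st)

-- A's foldl over range(a, len(arr)) equals loopN over the counts of arr.drop a.
lemma bridge : ∀ (l : List String) (arr : List String) (a : Nat) (st : Nat × Int),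
    arr.drop a = l →
    (PySem.List.pyRange (a : Int) (arr.length : Int) 1).foldl
      (fun (st : Nat × Int) item =>
        if PySem.Str.count (PySem.List.pyGetD arr item "") "a" < st.1 then
          (PySem.Str.count (PySem.List.pyGetD arr item "") "a", item)
        else st) st
    = loopN (l.map (fun s => PySem.Str.count s "a")) (a : Int) st := by
  intro l
  induction l with
  | nil =>
    intro arr a st h
    have hlen : arr.length ≤ a := by
      by_contra hc
      push Not at hc
      have := List.drop_eq_nil_iff.mp h
      omega
    rw [PySem.List.pyRange_one_eq_nil (by exact_mod_cast hlen)]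
    rfl
  | cons x xs ih =>
    intro arr a st h
    have ha : a < arr.length := by
      by_contra hc
      push Not at hc
      rw [List.drop_eq_nil_iff.mpr hc] at h
      simp at h
    have hx : arr[a] = x := by
      have h0 : (List.drop a arr)[0]'(by rw [h]; simp) = x := by
        simp [h]
      rw [List.getElem_drop] at h0
      simpa using h0
    have hget : PySem.List.pyGetD arr (a : Int) "" = x := by
      rw [PySem.List.pyGetD_natCast]
      simp [List.getD, hx, ha]
    rw [PySem.List.pyRange_one_cons (by exact_mod_cast ha)]
    simp only [List.foldl_cons, hget]
    have hdrop : arr.drop (a + 1) = xs := by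
      have : arr.drop (a + 1) = (arr.drop a).drop 1 := by
        rw [List.drop_drop]
      rw [this, h]
      rfl
    have := ih arr (a + 1)
      (if PySem.Str.count x "a" < st.1 then (PySem.Str.count x "a", (a : Int)) else st) hdrop
    rw [show ((a : Int) + 1) = (((a + 1 : Nat) : Int)) by push_cast; ring]
    simpa using this

-- Invariant: if mc is the minimum of the processed prefix p0 :: pt and k its first index,
-- running loopN over the rest yields the first index of the overall minimum.
lemma loop_inv : ∀ (rest : List Nat) (p0 : Nat) (pt : List Nat) (mc k : Nat),
    PySem.List.min? (p0 :: pt) (fun x => x) = some mc →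
    PySem.List.index? (p0 :: pt) mc = some k →
    (loopN rest ((p0 :: pt).length : Int) (mc, (k : Int))).2
      = ((PySem.List.index? ((p0 :: pt) ++ rest)
            ((PySem.List.min? ((p0 :: pt) ++ rest) (fun x => x)).getD 0)).getD 0 : Int) := by
  intro rest
  induction rest with
  | nil =>
    intro p0 pt mc k hmin hidx
    rw [PySem.List.index?_eq_idxOf?] at hidx
    simp [loopN, hmin, hidx]
  | cons c rest ih =>
    intro p0 pt mc k hmin hidx
    have hmc : mc = pt.foldl min p0 := by
      rw [PySem.List.min?_id_cons] at hmin
      exact (Option.some.injEq _ _ ▸ hmin).symm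
    have hmem : mc ∈ p0 :: pt := PySem.List.min?_mem hmin
    have hlow : ∀ y ∈ p0 :: pt, mc ≤ y := by
      intro y hy
      simpa using PySem.List.min?_isMin hmin y hy
    have hassoc : (p0 :: pt) ++ c :: rest = (p0 :: (pt ++ [c])) ++ rest := by simp
    by_cases hc : c < mc
    · -- new minimum c at index (p0 :: pt).length
      have hnotmem : c ∉ p0 :: pt := by
        intro hcm
        exact absurd (hlow c hcm) (by omega)
      have hmin' : PySem.List.min? (p0 :: (pt ++ [c])) (fun x => x) = some c := by
        rw [PySem.List.min?_id_cons, List.foldl_append]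
        simp [← hmc, Nat.min_eq_right (le_of_lt hc)]
      have hidx' : PySem.List.index? (p0 :: (pt ++ [c])) c = some (p0 :: pt).length := by
        have := PySem.List.index?_append_singleton_self (l := p0 :: pt) (c := c) hnotmem
        simpa using this
      have := ih p0 (pt ++ [c]) c (p0 :: pt).length hmin' hidx'
      rw [hassoc]
      rw [← this]
      simp [loopN, hc]
    · -- minimum unchanged
      have hmcle : mc ≤ c := le_of_not_gt hc
      have hmin' : PySem.List.min? (p0 :: (pt ++ [c])) (fun x => x) = some mc := by
        rw [PySem.List.min?_id_cons, List.foldl_append]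
        simp [← hmc, Nat.min_eq_left hmcle]
      have hidx' : PySem.List.index? (p0 :: (pt ++ [c])) mc = some k := by
        have := PySem.List.index?_append_of_mem (t := [c]) hmem
        rw [show p0 :: (pt ++ [c]) = (p0 :: pt) ++ [c] by simp, this, hidx]
      have := ih p0 (pt ++ [c]) mc k hmin' hidx'
      rw [hassoc]
      rw [← this]
      simp [loopN, hc]

-- ===== VERDICT (by name: the statement is the Claim_ definition above) =====
theorem find_count_min_spec : Claim_equal_find_count_min := by
  intro arr _ hpre
  unfold Spec_find_count_min
  match arr, hpre with
  | h :: t, _ =>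
    unfold find_count_min find_count_min_alt
    have hb := bridge t (h :: t) 1 (PySem.Str.count h "a", 0) (by rfl)
    simp only [Nat.cast_one] at hb
    simp only [List.headD_cons]
    rw [hb]
    have := loop_inv (t.map (fun s => PySem.Str.count s "a")) (PySem.Str.count h "a") []
      (PySem.Str.count h "a") 0 (by simp [PySem.List.min?_id_cons])
      (by rw [PySem.List.index?_eq_idxOf?]; simp)
    simpa using this
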